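-- pv_equiv track=rewrite | github.com/ankitjshi/data_analysis_UK_company_API | PythonProjectFinal_bb.py | create_year_grouping
-- ===== SOURCE A (Python) =====
-- def create_year_grouping(yearList):
--     year_group_dict={'1990_1995':0,'1995_2000':0,'2000_2005':0,'2005_2010':0,'2010_2015':0,'2015_2020':0}
--     for year in yearList:
--         if year > 1990 and year < 1995:
--             year_group_dict['1990_1995']+=1
--         elif year > 1995 and year < 2000:
--             year_group_dict['1995_2000']+=1
--         elif year > 2000 and year < 2005:
--             year_group_dict['2000_2005']+=1
--         elif year > 2005 and year < 2010:
--             year_group_dict['2005_2010']+=1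
--         elif year > 2010 and year < 2015:
--             year_group_dict['2010_2015']+=1
--         elif year > 2015 and year < 2020:
--             year_group_dict['2015_2020']+=1
--     return year_group_dict
-- ===== SOURCE B (Python) =====
-- def create_year_grouping(yearList):
--     keys = ['1990_1995', '1995_2000', '2000_2005', '2005_2010', '2010_2015', '2015_2020']
--     counts = [0] * 6
--     for year in yearList:
--         if 1990 < year < 2020 and year % 5 != 0:
--             idx = (year - 1990) // 5
--             counts[idx] += 1
--     return dict(zip(keys, counts))
-- ===== Notes on version B (the rewrite author's own statement) =====
-- stated objective: simpler
-- what changed: replaces the six-way if/elif chain with a single arithmetic bucket index ((year-1990)//5) into a counts table zipped with the ordered key list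
import Mathlib
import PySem

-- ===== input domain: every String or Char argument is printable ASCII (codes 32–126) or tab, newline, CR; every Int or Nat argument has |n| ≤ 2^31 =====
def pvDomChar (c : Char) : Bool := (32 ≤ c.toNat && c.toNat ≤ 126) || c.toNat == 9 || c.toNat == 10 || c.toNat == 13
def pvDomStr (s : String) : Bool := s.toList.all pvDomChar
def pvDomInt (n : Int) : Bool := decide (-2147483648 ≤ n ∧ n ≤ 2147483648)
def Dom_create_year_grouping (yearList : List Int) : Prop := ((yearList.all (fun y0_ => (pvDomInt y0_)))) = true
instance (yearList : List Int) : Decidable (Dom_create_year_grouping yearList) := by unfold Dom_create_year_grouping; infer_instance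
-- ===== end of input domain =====

-- B replaces A's six-way if/elif chain by one arithmetic bucket index into a counts table (objective: simpler).

-- ===== PORT A =====
-- `d[k] += 1` on a dict whose keys are all present: increment the value at the first matching key, order preserved
def pvBumpA (d : List (String × Int)) (k : String) : List (String × Int) :=
  match d with
  | [] => []
  | (k', v) :: t => if k' = k then (k', v + 1) :: t else (k', v) :: pvBumpA t k

def pvStepA (d : List (String × Int)) (year : Int) : List (String × Int) :=
  if year > 1990 ∧ year < 1995 then pvBumpA d "1990_1995"
  else if year > 1995 ∧ year < 2000 then pvBumpA d "1995_2000"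
  else if year > 2000 ∧ year < 2005 then pvBumpA d "2000_2005"
  else if year > 2005 ∧ year < 2010 then pvBumpA d "2005_2010"
  else if year > 2010 ∧ year < 2015 then pvBumpA d "2010_2015"
  else if year > 2015 ∧ year < 2020 then pvBumpA d "2015_2020"
  else d

def create_year_grouping (yearList : List Int) : List (String × Int) :=
  yearList.foldl pvStepA
    [("1990_1995", 0), ("1995_2000", 0), ("2000_2005", 0), ("2005_2010", 0), ("2010_2015", 0), ("2015_2020", 0)]

-- ===== PORT B =====
def pvKeysB : List String := ["1990_1995", "1995_2000", "2000_2005", "2005_2010", "2010_2015", "2015_2020"]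

-- `counts[idx] += 1` (idx is in range 0..5 under the guard)
def pvIncB (c : List Int) (i : Nat) : List Int := c.set i (c.getD i 0 + 1)

def pvStepB (c : List Int) (year : Int) : List Int :=
  if 1990 < year ∧ year < 2020 ∧ PySem.Int.mod year 5 ≠ 0 then
    pvIncB c (PySem.Int.floordiv (year - 1990) 5).toNat
  else c

def create_year_grouping_alt (yearList : List Int) : List (String × Int) :=
  pvKeysB.zip (yearList.foldl pvStepB [0, 0, 0, 0, 0, 0])

-- ===== PRECONDITION & SPEC =====
def Spec_create_year_grouping (yearList : List Int) (out : List (String × Int)) : Prop := out = create_year_grouping_alt yearList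
instance (yearList : List Int) (out : List (String × Int)) : Decidable (Spec_create_year_grouping yearList out) := by unfold Spec_create_year_grouping; infer_instance

-- ===== CLAIM (what is proved, stated in full; the proofs are below) =====
def Claim_equal_create_year_grouping : Prop := ∀ (yearList : List Int), Dom_create_year_grouping yearList → Spec_create_year_grouping yearList (create_year_grouping yearList)

-- ===== LEMMAS AND PROOFS =====

theorem pv_step_eq (y a b c d e f : Int) :
    pvStepA [("1990_1995", a), ("1995_2000", b), ("2000_2005", c), ("2005_2010", d), ("2010_2015", e), ("2015_2020", f)] y =
      pvKeysB.zip (pvStepB [a, b, c, d, e, f] y) ∧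
    ∃ a' b' c' d' e' f' : Int,
      pvStepB [a, b, c, d, e, f] y = [a', b', c', d', e', f'] := by
  have hm : PySem.Int.mod y 5 = y % 5 := PySem.Int.mod_eq_emod_of_pos (by norm_num)
  have hd : PySem.Int.floordiv (y - 1990) 5 = (y - 1990) / 5 := PySem.Int.floordiv_eq_ediv_of_pos (by norm_num)
  by_cases h1 : y > 1990 ∧ y < 1995
  · have hg : 1990 < y ∧ y < 2020 ∧ PySem.Int.mod y 5 ≠ 0 := by rw [hm]; omega
    have hi : (PySem.Int.floordiv (y - 1990) 5).toNat = 0 := by rw [hd]; omega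
    have hB : pvStepB [a, b, c, d, e, f] y = [a + 1, b, c, d, e, f] := by
      rw [pvStepB, if_pos hg, hi, pvIncB]; simp
    have hA : pvStepA [("1990_1995", a), ("1995_2000", b), ("2000_2005", c), ("2005_2010", d), ("2010_2015", e), ("2015_2020", f)] y = [("1990_1995", a + 1), ("1995_2000", b), ("2000_2005", c), ("2005_2010", d), ("2010_2015", e), ("2015_2020", f)] := by
      rw [pvStepA, if_pos h1]; simp [pvBumpA]
    exact ⟨by rw [hA, hB]; simp [pvKeysB], a + 1, b, c, d, e, f, hB⟩
  by_cases h2 : y > 1995 ∧ y < 2000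
  · have hg : 1990 < y ∧ y < 2020 ∧ PySem.Int.mod y 5 ≠ 0 := by rw [hm]; omega
    have hi : (PySem.Int.floordiv (y - 1990) 5).toNat = 1 := by rw [hd]; omega
    have hB : pvStepB [a, b, c, d, e, f] y = [a, b + 1, c, d, e, f] := by
      rw [pvStepB, if_pos hg, hi, pvIncB]; simp
    have hA : pvStepA [("1990_1995", a), ("1995_2000", b), ("2000_2005", c), ("2005_2010", d), ("2010_2015", e), ("2015_2020", f)] y = [("1990_1995", a), ("1995_2000", b + 1), ("2000_2005", c), ("2005_2010", d), ("2010_2015", e), ("2015_2020", f)] := by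
      rw [pvStepA, if_neg h1, if_pos h2]; simp [pvBumpA]
    exact ⟨by rw [hA, hB]; simp [pvKeysB], a, b + 1, c, d, e, f, hB⟩
  by_cases h3 : y > 2000 ∧ y < 2005
  · have hg : 1990 < y ∧ y < 2020 ∧ PySem.Int.mod y 5 ≠ 0 := by rw [hm]; omega
    have hi : (PySem.Int.floordiv (y - 1990) 5).toNat = 2 := by rw [hd]; omega
    have hB : pvStepB [a, b, c, d, e, f] y = [a, b, c + 1, d, e, f] := by
      rw [pvStepB, if_pos hg, hi, pvIncB]; simp
    have hA : pvStepA [("1990_1995", a), ("1995_2000", b), ("2000_2005", c), ("2005_2010", d), ("2010_2015", e), ("2015_2020", f)] y = [("1990_1995", a), ("1995_2000", b), ("2000_2005", c + 1), ("2005_2010", d), ("2010_2015", e), ("2015_2020", f)] := by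
      rw [pvStepA, if_neg h1, if_neg h2, if_pos h3]; simp [pvBumpA]
    exact ⟨by rw [hA, hB]; simp [pvKeysB], a, b, c + 1, d, e, f, hB⟩
  by_cases h4 : y > 2005 ∧ y < 2010
  · have hg : 1990 < y ∧ y < 2020 ∧ PySem.Int.mod y 5 ≠ 0 := by rw [hm]; omega
    have hi : (PySem.Int.floordiv (y - 1990) 5).toNat = 3 := by rw [hd]; omega
    have hB : pvStepB [a, b, c, d, e, f] y = [a, b, c, d + 1, e, f] := by
      rw [pvStepB, if_pos hg, hi, pvIncB]; simp
    have hA : pvStepA [("1990_1995", a), ("1995_2000", b), ("2000_2005", c), ("2005_2010", d), ("2010_2015", e), ("2015_2020", f)] y = [("1990_1995", a), ("1995_2000", b), ("2000_2005", c), ("2005_2010", d + 1), ("2010_2015", e), ("2015_2020", f)] := by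
      rw [pvStepA, if_neg h1, if_neg h2, if_neg h3, if_pos h4]; simp [pvBumpA]
    exact ⟨by rw [hA, hB]; simp [pvKeysB], a, b, c, d + 1, e, f, hB⟩
  by_cases h5 : y > 2010 ∧ y < 2015
  · have hg : 1990 < y ∧ y < 2020 ∧ PySem.Int.mod y 5 ≠ 0 := by rw [hm]; omega
    have hi : (PySem.Int.floordiv (y - 1990) 5).toNat = 4 := by rw [hd]; omega
    have hB : pvStepB [a, b, c, d, e, f] y = [a, b, c, d, e + 1, f] := by
      rw [pvStepB, if_pos hg, hi, pvIncB]; simp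
    have hA : pvStepA [("1990_1995", a), ("1995_2000", b), ("2000_2005", c), ("2005_2010", d), ("2010_2015", e), ("2015_2020", f)] y = [("1990_1995", a), ("1995_2000", b), ("2000_2005", c), ("2005_2010", d), ("2010_2015", e + 1), ("2015_2020", f)] := by
      rw [pvStepA, if_neg h1, if_neg h2, if_neg h3, if_neg h4, if_pos h5]; simp [pvBumpA]
    exact ⟨by rw [hA, hB]; simp [pvKeysB], a, b, c, d, e + 1, f, hB⟩
  by_cases h6 : y > 2015 ∧ y < 2020
  · have hg : 1990 < y ∧ y < 2020 ∧ PySem.Int.mod y 5 ≠ 0 := by rw [hm]; omega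
    have hi : (PySem.Int.floordiv (y - 1990) 5).toNat = 5 := by rw [hd]; omega
    have hB : pvStepB [a, b, c, d, e, f] y = [a, b, c, d, e, f + 1] := by
      rw [pvStepB, if_pos hg, hi, pvIncB]; simp
    have hA : pvStepA [("1990_1995", a), ("1995_2000", b), ("2000_2005", c), ("2005_2010", d), ("2010_2015", e), ("2015_2020", f)] y = [("1990_1995", a), ("1995_2000", b), ("2000_2005", c), ("2005_2010", d), ("2010_2015", e), ("2015_2020", f + 1)] := by
      rw [pvStepA, if_neg h1, if_neg h2, if_neg h3, if_neg h4, if_neg h5, if_pos h6]; simp [pvBumpA]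
    exact ⟨by rw [hA, hB]; simp [pvKeysB], a, b, c, d, e, f + 1, hB⟩
  · have hg : ¬ (1990 < y ∧ y < 2020 ∧ PySem.Int.mod y 5 ≠ 0) := by rw [hm]; omega
    have hB : pvStepB [a, b, c, d, e, f] y = [a, b, c, d, e, f] := by rw [pvStepB, if_neg hg]
    have hA : pvStepA [("1990_1995", a), ("1995_2000", b), ("2000_2005", c), ("2005_2010", d), ("2010_2015", e), ("2015_2020", f)] y = [("1990_1995", a), ("1995_2000", b), ("2000_2005", c), ("2005_2010", d), ("2010_2015", e), ("2015_2020", f)] := by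
      rw [pvStepA, if_neg h1, if_neg h2, if_neg h3, if_neg h4, if_neg h5, if_neg h6]
    exact ⟨by rw [hA, hB]; simp [pvKeysB], a, b, c, d, e, f, hB⟩

theorem pv_fold_eq (ys : List Int) : ∀ (a b c d e f : Int),
    ys.foldl pvStepA [("1990_1995", a), ("1995_2000", b), ("2000_2005", c), ("2005_2010", d), ("2010_2015", e), ("2015_2020", f)] =
      pvKeysB.zip (ys.foldl pvStepB [a, b, c, d, e, f]) := by
  induction ys with
  | nil => intro a b c d e f; simp [pvKeysB]
  | cons y t ih =>
    intro a b c d e f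
    obtain ⟨hstep, a', b', c', d', e', f', hB⟩ := pv_step_eq y a b c d e f
    simp only [List.foldl, hstep, hB]
    exact ih a' b' c' d' e' f'

-- ===== VERDICT (by name: the statement is the Claim_ definition above) =====
theorem create_year_grouping_spec : Claim_equal_create_year_grouping := by
  intro yearList _
  unfold Spec_create_year_grouping create_year_grouping create_year_grouping_alt
  exact pv_fold_eq yearList 0 0 0 0 0 0
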